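-- pv_equiv track=rewrite | github.com/sidharth1037/Map-Creator | vectorize.py | stitch_sequential_lines
-- ===== SOURCE A (Python) =====
-- STITCH_GAP_TOL = 60
--
-- STITCH_ALIGN_TOL = 10
--
-- def stitch_sequential_lines(lines, orientation='horizontal'):
--     if not lines: return []
--     idx_align = 1 if orientation == 'horizontal' else 0
--     idx_start = 0 if orientation == 'horizontal' else 1
--     buckets = []
--     processed = [False] * len(lines)
--     for i in range(len(lines)):
--         if processed[i]: continue
--         bucket = [lines[i]]
--         processed[i] = True
--         for j in range(i + 1, len(lines)):
--             if processed[j]: continue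
--             if abs(lines[i][idx_align] - lines[j][idx_align]) < STITCH_ALIGN_TOL:
--                 bucket.append(lines[j])
--                 processed[j] = True
--         buckets.append(bucket)
--     final_lines = []
--     for bucket in buckets:
--         bucket.sort(key=lambda l: min(l[idx_start], l[idx_start+2]))
--         if not bucket: continue
--         curr = bucket[0]
--         c_min = min(curr[idx_start], curr[idx_start+2])
--         c_max = max(curr[idx_start], curr[idx_start+2])
--         avg_pos = curr[idx_align]
--         count = 1
--         for k in range(1, len(bucket)):
--             next_l = bucket[k]
--             n_min = min(next_l[idx_start], next_l[idx_start+2])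
--             n_max = max(next_l[idx_start], next_l[idx_start+2])
--             if n_min <= c_max + STITCH_GAP_TOL:
--                 c_max = max(c_max, n_max)
--                 avg_pos += next_l[idx_align]
--                 count += 1
--             else:
--                 final_pos = int(avg_pos / count)
--                 if orientation == 'horizontal': final_lines.append([c_min, final_pos, c_max, final_pos])
--                 else:                           final_lines.append([final_pos, c_min, final_pos, c_max])
--                 curr = next_l
--                 c_min, c_max = n_min, n_max
--                 avg_pos = curr[idx_align]
--                 count = 1
--         final_pos = int(avg_pos / count)
--         if orientation == 'horizontal': final_lines.append([c_min, final_pos, c_max, final_pos])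
--         else:                           final_lines.append([final_pos, c_min, final_pos, c_max])
--     return final_lines
-- ===== SOURCE B (Python) =====
-- STITCH_GAP_TOL = 60
--
-- STITCH_ALIGN_TOL = 10
--
-- def stitch_sequential_lines(lines, orientation='horizontal'):
--     if not lines:
--         return []
--     ia = 1 if orientation == 'horizontal' else 0
--     i0 = 0 if orientation == 'horizontal' else 1
--     # Grid hashing: seeds are pairwise >= ALIGN_TOL apart, so each ALIGN_TOL-wide cell holds at
--     # most one seed; a line's matching seeds all sit in its own cell or a neighbour, so each
--     # line is filed with three dict lookups instead of a scan over the earlier lines.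
--     cell = {}      # align // ALIGN_TOL -> (seed align, bucket id)
--     buckets = []   # bucket members, in bucket-creation order
--     for ln in lines:
--         x = ln[ia]
--         c = x // STITCH_ALIGN_TOL
--         best = -1
--         for cc in (c - 1, c, c + 1):
--             s = cell.get(cc)
--             if s is not None and abs(s[0] - x) < STITCH_ALIGN_TOL and (best < 0 or s[1] < best):
--                 best = s[1]
--         if best >= 0:
--             buckets[best].append(ln)
--         else:
--             cell[c] = (x, len(buckets))
--             buckets.append([ln])
--     out = []
--     for members in buckets:
--         members.sort(key=lambda l: min(l[i0], l[i0 + 2]))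
--         # split the sorted members into maximal runs whose gaps stay within tolerance
--         runs = []
--         cur = [members[0]]
--         c_max = max(members[0][i0], members[0][i0 + 2])
--         for l in members[1:]:
--             lo, hi = min(l[i0], l[i0 + 2]), max(l[i0], l[i0 + 2])
--             if lo <= c_max + STITCH_GAP_TOL:
--                 cur.append(l)
--                 c_max = max(c_max, hi)
--             else:
--                 runs.append(cur)
--                 cur, c_max = [l], hi
--         runs.append(cur)
--         # one output line per run, computed from the run as a whole
--         for run in runs:
--             lo = min(run[0][i0], run[0][i0 + 2])
--             hi = max(max(l[i0], l[i0 + 2]) for l in run)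
--             pos = int(sum(l[ia] for l in run) / len(run))
--             out.append([lo, pos, hi, pos] if orientation == 'horizontal' else [pos, lo, pos, hi])
--     return out
-- ===== Notes on version B (the rewrite author's own statement) =====
-- stated objective: alternative
-- what changed: A's processed-flag double scan over lines is replaced by grid hashing: seed alignments stay pairwise >= tolerance apart, so a dict keyed by align//tolerance holds at most one seed per cell and each line is filed with three dict lookups instead of a scan; the merge phase then splits each sorted bucket into gap-bounded runs and emits one line per run instead of A's emit-as-you-go accumulator loop.
import Mathlib
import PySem

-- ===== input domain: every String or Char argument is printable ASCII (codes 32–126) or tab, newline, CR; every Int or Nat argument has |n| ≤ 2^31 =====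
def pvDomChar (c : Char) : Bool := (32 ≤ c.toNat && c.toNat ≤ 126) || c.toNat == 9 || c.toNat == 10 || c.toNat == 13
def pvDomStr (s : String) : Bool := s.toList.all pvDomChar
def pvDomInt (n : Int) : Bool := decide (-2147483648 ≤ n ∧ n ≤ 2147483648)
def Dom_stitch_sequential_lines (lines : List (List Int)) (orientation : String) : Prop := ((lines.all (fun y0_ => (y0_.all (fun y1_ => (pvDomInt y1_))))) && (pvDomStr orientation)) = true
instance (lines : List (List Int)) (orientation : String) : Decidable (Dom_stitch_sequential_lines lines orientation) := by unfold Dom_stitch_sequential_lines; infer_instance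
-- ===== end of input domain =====

-- B replaces A's quadratic processed-flag bucketing by a grid hash: seed alignments are pairwise
-- ≥ tolerance apart, so a dict keyed by align // tolerance holds at most one seed per cell and
-- each line is filed with three dict lookups; the merge phase splits each sorted bucket into
-- runs and emits one line per run (objective: alternative).

-- l[i] for a nonnegative index; Pre_ guarantees i is in range, so getD is exact there
def pvGi (l : List Int) (i : Nat) : Int := l.getD i 0

-- int(avg_pos / count): Python truncates the true quotient toward zero; exact at the
-- magnitudes admitted by Dom (|entries| ≤ 2^31, quotients far below 2^53)
def pvIntDivTrunc (a b : Int) : Int := a.tdiv b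

-- ===== PORT A =====
-- A's outer loop with the `processed` array: the unprocessed lines are kept as a list (in index
-- order); each seed absorbs exactly the later unprocessed lines within alignment tolerance
def pvBucketsA (ia : Nat) : List (List Int) → List (List (List Int))
  | [] => []
  | seed :: rest =>
    (seed :: rest.filter (fun l => |pvGi seed ia - pvGi l ia| < 10)) ::
      pvBucketsA ia (rest.filter (fun l => ¬(|pvGi seed ia - pvGi l ia| < 10)))
  termination_by ls => ls.length
  decreasing_by
    simp only [List.length_cons, List.length_unattach]
    exact Nat.lt_succ_of_le (le_trans (List.length_filter_le _ _) (by simp))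

def pvEmit (horiz : Bool) (cmin cmax avg cnt : Int) : List Int :=
  let pos := pvIntDivTrunc avg cnt
  if horiz then [cmin, pos, cmax, pos] else [pos, cmin, pos, cmax]

-- A's inner merge loop over the sorted bucket, state (curr-derived c_min, c_max, avg_pos, count)
def pvLoopA (i0 ia : Nat) (horiz : Bool) : List (List Int) → Int → Int → Int → Int → List (List Int)
  | [], cmin, cmax, avg, cnt => [pvEmit horiz cmin cmax avg cnt]
  | l :: rest, cmin, cmax, avg, cnt =>
    let nmin := min (pvGi l i0) (pvGi l (i0 + 2))
    let nmax := max (pvGi l i0) (pvGi l (i0 + 2))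
    if nmin ≤ cmax + 60 then
      pvLoopA i0 ia horiz rest cmin (max cmax nmax) (avg + pvGi l ia) (cnt + 1)
    else
      pvEmit horiz cmin cmax avg cnt :: pvLoopA i0 ia horiz rest nmin nmax (pvGi l ia) 1

def pvProcA (i0 ia : Nat) (horiz : Bool) (bucket : List (List Int)) : List (List Int) :=
  match PySem.List.sorted bucket (fun l => min (pvGi l i0) (pvGi l (i0 + 2))) with
  | [] => []
  | c :: rest =>
    pvLoopA i0 ia horiz rest (min (pvGi c i0) (pvGi c (i0 + 2)))
      (max (pvGi c i0) (pvGi c (i0 + 2))) (pvGi c ia) 1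

def stitch_sequential_lines (lines : List (List Int)) (orientation : String) : List (List Int) :=
  if lines = [] then []
  else
    let horiz := orientation = "horizontal"
    let ia := if horiz then 1 else 0
    let i0 := if horiz then 0 else 1
    (pvBucketsA ia lines).foldl (fun acc b => acc ++ pvProcA i0 ia horiz b) []

-- ===== PORT B =====
-- one turn of B's `for cc in (c-1, c, c+1)` candidate loop: s = cell.get(cc); keep the smaller id
def pvUpd (x : Int) (s : Option (Int × Int)) (best : Int) : Int :=
  match s with
  | some p => if |p.1 - x| < 10 ∧ (best < 0 ∨ p.2 < best) then p.2 else best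
  | none => best

-- B's bucketing step: file one line via three grid-cell lookups (state = cell dict, buckets)
def pvStepB (ia : Nat) (st : PySem.Dict Int (Int × Int) × List (List (List Int))) (ln : List Int) :
    PySem.Dict Int (Int × Int) × List (List (List Int)) :=
  let x := pvGi ln ia
  let c := PySem.Int.floordiv x 10
  let best := pvUpd x (st.1.get? (c + 1)) (pvUpd x (st.1.get? c) (pvUpd x (st.1.get? (c - 1)) (-1)))
  if 0 ≤ best then (st.1, st.2.modify best.toNat (fun b => b ++ [ln]))
  else (st.1.insert c (x, (st.2.length : Int)), st.2 ++ [[ln]])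

-- split the sorted members into maximal runs whose gaps stay within tolerance
def pvSplitRuns (i0 : Nat) : List (List Int) → Int → List (List Int) → List (List (List Int))
  | [], _, cur => [cur]
  | l :: ls, cmax, cur =>
    let lo := min (pvGi l i0) (pvGi l (i0 + 2))
    let hi := max (pvGi l i0) (pvGi l (i0 + 2))
    if lo ≤ cmax + 60 then pvSplitRuns i0 ls (max cmax hi) (cur ++ [l])
    else cur :: pvSplitRuns i0 ls hi [l]

-- max(max(l[i0], l[i0+2]) for l in run) over the nonempty run c :: rs
def pvRunMax (i0 : Nat) (c : List Int) (rs : List (List Int)) : Int :=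
  rs.foldl (fun m l => max m (max (pvGi l i0) (pvGi l (i0 + 2)))) (max (pvGi c i0) (pvGi c (i0 + 2)))

def pvEmitRun (i0 ia : Nat) (horiz : Bool) : List (List Int) → List Int
  | [] => []
  | c :: rs =>
    pvEmit horiz (min (pvGi c i0) (pvGi c (i0 + 2))) (pvRunMax i0 c rs)
      (((c :: rs).map (fun l => pvGi l ia)).sum) ((c :: rs).length)

def pvProcB (i0 ia : Nat) (horiz : Bool) (members : List (List Int)) : List (List Int) :=
  match PySem.List.sorted members (fun l => min (pvGi l i0) (pvGi l (i0 + 2))) with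
  | [] => []
  | c :: rest =>
    (pvSplitRuns i0 rest (max (pvGi c i0) (pvGi c (i0 + 2))) [c]).map (pvEmitRun i0 ia horiz)

def stitch_sequential_lines_alt (lines : List (List Int)) (orientation : String) : List (List Int) :=
  if lines = [] then []
  else
    let horiz := orientation = "horizontal"
    let ia := if horiz then 1 else 0
    let i0 := if horiz then 0 else 1
    ((lines.foldl (pvStepB ia) (PySem.Dict.empty, [])).2).flatMap (pvProcB i0 ia horiz)

-- ===== PRECONDITION & SPEC =====
-- Pre_ excludes exactly the inputs on which Python A raises IndexError: a line shorter than the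
-- indices the chosen orientation reads (0,1,2 horizontally; 0,1,3 otherwise)
def Pre_stitch_sequential_lines (lines : List (List Int)) (orientation : String) : Prop :=
  ∀ l ∈ lines, (if orientation = "horizontal" then 3 else 4) ≤ l.length
instance (lines : List (List Int)) (orientation : String) : Decidable (Pre_stitch_sequential_lines lines orientation) := by unfold Pre_stitch_sequential_lines; infer_instance

def pvWitness_stitch_sequential_lines : List (List Int) × String :=
  ([[0, 2, 50, 2], [55, 0, 120, 0], [300, 1, 400, 1], [0, 100, 40, 100]], "horizontal")

def Spec_stitch_sequential_lines (lines : List (List Int)) (orientation : String) (out : List (List Int)) : Prop := out = stitch_sequential_lines_alt lines orientation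
instance (lines : List (List Int)) (orientation : String) (out : List (List Int)) : Decidable (Spec_stitch_sequential_lines lines orientation out) := by unfold Spec_stitch_sequential_lines; infer_instance

-- ===== CLAIM (what is proved, stated in full; the proofs are below) =====
def Claim_equal_stitch_sequential_lines : Prop := ∀ (lines : List (List Int)) (orientation : String), Dom_stitch_sequential_lines lines orientation → Pre_stitch_sequential_lines lines orientation → Spec_stitch_sequential_lines lines orientation (stitch_sequential_lines lines orientation)

-- ===== LEMMAS AND PROOFS =====

-- ghost intermediate for the bucketing: seed/bucket pairs in creation order; each line joins the
-- first bucket (least creation index) whose seed alignment is within tolerance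
def pvAddLine (ia : Nat) (bs : List (Int × List (List Int))) (l : List Int) : List (Int × List (List Int)) :=
  match bs with
  | [] => [(pvGi l ia, [l])]
  | (s, ms) :: rest =>
    if |s - pvGi l ia| < 10 then (s, ms ++ [l]) :: rest
    else (s, ms) :: pvAddLine ia rest l

-- B's fold distributes over the first bucket: lines matching seed s go into it, the rest recurse
theorem pvAddLine_foldl_cons (ia : Nat) (s : Int) (ls : List (List Int)) :
    ∀ (ms : List (List Int)) (bs : List (Int × List (List Int))),
    ls.foldl (pvAddLine ia) ((s, ms) :: bs) =
      (s, ms ++ ls.filter (fun l => |s - pvGi l ia| < 10)) ::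
        (ls.filter (fun l => ¬(|s - pvGi l ia| < 10))).foldl (pvAddLine ia) bs := by
  induction ls with
  | nil => intro ms bs; simp
  | cons l ls ih =>
    intro ms bs
    by_cases h : |s - pvGi l ia| < 10
    · have e1 : pvAddLine ia ((s, ms) :: bs) l = (s, ms ++ [l]) :: bs := by
        simp [pvAddLine, h]
      rw [List.foldl_cons, e1, ih]
      simp [h]
    · have e1 : pvAddLine ia ((s, ms) :: bs) l = (s, ms) :: pvAddLine ia bs l := by
        simp [pvAddLine, h]
      rw [List.foldl_cons, e1, ih]
      have h' : (10 : Int) ≤ |s - pvGi l ia| := not_lt.mp h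
      simp [h', List.foldl_cons]

-- the bucket members of the ghost fold are exactly A's buckets
theorem pvBuckets_eq (ia : Nat) : ∀ (ls : List (List Int)),
    (ls.foldl (pvAddLine ia) []).map Prod.snd = pvBucketsA ia ls := by
  intro ls
  induction hn : ls.length using Nat.strong_induction_on generalizing ls with
  | _ n ih =>
    match ls with
    | [] => simp [pvBucketsA]
    | seed :: rest =>
      have h1 : (seed :: rest).foldl (pvAddLine ia) [] =
          rest.foldl (pvAddLine ia) [(pvGi seed ia, [seed])] := by
        simp [pvAddLine]
      rw [h1, pvAddLine_foldl_cons]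
      rw [pvBucketsA]
      simp only [List.map_cons, List.cons.injEq]
      constructor
      · simp
      · apply ih ((rest.filter (fun l => ¬(|pvGi seed ia - pvGi l ia| < 10))).length)
        · have := List.length_filter_le (fun l => decide ¬(|pvGi seed ia - pvGi l ia| < 10)) rest
          simp only [List.length_cons] at hn
          omega
        · rfl

-- modify that keeps the first component: projections
theorem pvMapFst_modify {α β : Type} (g : β → β) :
    ∀ (l : List (α × β)) (k : Nat),
    (l.modify k (fun p => (p.1, g p.2))).map Prod.fst = l.map Prod.fst := by
  intro l
  induction l with
  | nil => intro k; simp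
  | cons p l ih => intro k; cases k <;> simp [List.modify_cons, ih]

theorem pvMapSnd_modify {α β : Type} (g : β → β) :
    ∀ (l : List (α × β)) (k : Nat),
    (l.modify k (fun p => (p.1, g p.2))).map Prod.snd = (l.map Prod.snd).modify k g := by
  intro l
  induction l with
  | nil => intro k; simp
  | cons p l ih => intro k; cases k <;> simp [List.modify_cons, ih]

-- pvAddLine when no seed matches: a new bucket is appended
theorem pvAddLine_no (ia : Nat) (l : List Int) :
    ∀ (abs : List (Int × List (List Int))), (∀ p ∈ abs, ¬(|p.1 - pvGi l ia| < 10)) →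
    pvAddLine ia abs l = abs ++ [(pvGi l ia, [l])] := by
  intro abs
  induction abs with
  | nil => intro _; simp [pvAddLine]
  | cons p rest ih =>
    intro h
    obtain ⟨s, ms⟩ := p
    have hs : ¬(|s - pvGi l ia| < 10) := h (s, ms) (by simp)
    simp [pvAddLine, hs, ih (fun q hq => h q (by simp [hq]))]

-- pvAddLine when k is the least matching seed index: that bucket is extended
theorem pvAddLine_yes (ia : Nat) (l : List Int) :
    ∀ (abs : List (Int × List (List Int))) (k : Nat), k < abs.length →
    |(abs.map Prod.fst).getD k 0 - pvGi l ia| < 10 →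
    (∀ j, j < k → ¬(|(abs.map Prod.fst).getD j 0 - pvGi l ia| < 10)) →
    pvAddLine ia abs l = abs.modify k (fun p => (p.1, p.2 ++ [l])) := by
  intro abs
  induction abs with
  | nil => intro k hk; simp at hk
  | cons p rest ih =>
    intro k hk hm hleast
    obtain ⟨s, ms⟩ := p
    cases k with
    | zero =>
      simp only [List.map_cons, List.getD_cons_zero] at hm
      simp [pvAddLine, hm, List.modify_cons]
    | succ j =>
      have h0 : ¬(|s - pvGi l ia| < 10) := by
        have := hleast 0 (Nat.succ_pos j)
        simpa using this
      simp only [List.length_cons] at hk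
      rw [List.modify_cons]
      simp only [pvAddLine, h0]
      rw [ih j (by omega) (by simpa using hm)
        (fun j' hj' => by simpa using hleast (j' + 1) (by omega))]
      simp

-- grid-cell arithmetic: matching aligns land in the three neighbouring cells, and two aligns in
-- one cell are within tolerance
theorem pvCell_range (a x : Int) (h : |a - x| < 10) :
    PySem.Int.floordiv x 10 - 1 ≤ PySem.Int.floordiv a 10 ∧
      PySem.Int.floordiv a 10 ≤ PySem.Int.floordiv x 10 + 1 := by
  rw [abs_lt] at h
  rw [PySem.Int.floordiv_eq_ediv_of_pos (b := 10) (by norm_num),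
    PySem.Int.floordiv_eq_ediv_of_pos (b := 10) (by norm_num)]
  omega

theorem pvCell_close (a b : Int) (h : PySem.Int.floordiv a 10 = PySem.Int.floordiv b 10) :
    |a - b| < 10 := by
  rw [PySem.Int.floordiv_eq_ediv_of_pos (b := 10) (by norm_num),
    PySem.Int.floordiv_eq_ediv_of_pos (b := 10) (by norm_num)] at h
  rw [abs_lt]
  omega

-- invariant tying the grid dict to the seed list S (creation order):
-- each seed is stored in its own cell, the dict holds nothing else, seeds are ≥ 10 apart
def pvInvB (d : PySem.Dict Int (Int × Int)) (S : List Int) : Prop :=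
  (∀ k, k < S.length →
      d.get? (PySem.Int.floordiv (S.getD k 0) 10) = some (S.getD k 0, (k : Int))) ∧
  (∀ c a i, d.get? c = some (a, i) →
      0 ≤ i ∧ i.toNat < S.length ∧ S.getD i.toNat 0 = a ∧ PySem.Int.floordiv a 10 = c) ∧
  List.Pairwise (fun a b => 10 ≤ |a - b|) S

theorem pvInvB_empty : pvInvB PySem.Dict.empty [] := by
  refine ⟨by simp, fun c a i h => by simp [PySem.Dict.get?_empty] at h, by simp⟩

-- one candidate-loop turn keeps the running best nonnegative and non-increasing
theorem pvUpd_le (x : Int) (s : Option (Int × Int)) (b : Int)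
    (hb : 0 ≤ b) (hs : ∀ a i, s = some (a, i) → 0 ≤ i) :
    0 ≤ pvUpd x s b ∧ pvUpd x s b ≤ b := by
  cases s with
  | none => exact ⟨hb, le_refl b⟩
  | some p =>
    simp only [pvUpd]
    split_ifs with h
    · exact ⟨hs p.1 p.2 rfl, by rcases h.2 with h' | h' <;> omega⟩
    · exact ⟨hb, le_refl b⟩

-- a candidate-loop turn that sees the matching seed (a, i) lands at or below i
theorem pvUpd_hit (x a i b : Int) (hm : |a - x| < 10) (hi : 0 ≤ i) :
    0 ≤ pvUpd x (some (a, i)) b ∧ pvUpd x (some (a, i)) b ≤ i := by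
  simp only [pvUpd]
  split_ifs with h
  · exact ⟨hi, le_refl i⟩
  · rw [not_and_or, not_or] at h
    rcases h with h | h
    · exact absurd hm h
    · exact ⟨by omega, by omega⟩

-- the bucketing step of B agrees with the ghost pvAddLine step and preserves the invariant
theorem pvStep_corr (ia : Nat) (d : PySem.Dict Int (Int × Int))
    (abs : List (Int × List (List Int))) (hI : pvInvB d (abs.map Prod.fst)) (l : List Int) :
    (pvStepB ia (d, abs.map Prod.snd) l).2 = (pvAddLine ia abs l).map Prod.snd ∧
      pvInvB (pvStepB ia (d, abs.map Prod.snd) l).1 ((pvAddLine ia abs l).map Prod.fst) := by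
  obtain ⟨h1, h2, h3⟩ := hI
  set S := abs.map Prod.fst with hS
  set x := pvGi l ia with hx
  set c := PySem.Int.floordiv x 10 with hc
  have hlen : S.length = abs.length := by simp [hS]
  -- every dict value has a nonnegative index
  have hnn : ∀ cc, ∀ a i, d.get? cc = some (a, i) → 0 ≤ i := fun cc a i h => (h2 cc a i h).1
  -- Q: the running best is -1 or a matching seed index
  have hQ : ∀ cc b, (b = -1 ∨ (0 ≤ b ∧ b.toNat < S.length ∧ |S.getD b.toNat 0 - x| < 10)) →
      (pvUpd x (d.get? cc) b = -1 ∨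
        (0 ≤ pvUpd x (d.get? cc) b ∧ (pvUpd x (d.get? cc) b).toNat < S.length ∧
          |S.getD (pvUpd x (d.get? cc) b).toNat 0 - x| < 10)) := by
    intro cc b hb
    cases hg : d.get? cc with
    | none => simpa [pvUpd] using hb
    | some p =>
      obtain ⟨hi0, hilt, hiv, _⟩ := h2 cc p.1 p.2 hg
      simp only [pvUpd]
      split_ifs with h
      · exact Or.inr ⟨hi0, hilt, by rw [hiv]; exact h.1⟩
      · exact hb
  by_cases hEx : ∀ k, k < S.length → ¬(|S.getD k 0 - x| < 10)
  · -- no seed matches: best stays -1, a new seed/bucket is created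
    have hstep : ∀ cc b, b = -1 ∨ (0 ≤ b ∧ b.toNat < S.length ∧ |S.getD b.toNat 0 - x| < 10) →
        pvUpd x (d.get? cc) b = b := by
      intro cc b _
      cases hg : d.get? cc with
      | none => rfl
      | some p =>
        obtain ⟨hi0, hilt, hiv, _⟩ := h2 cc p.1 p.2 hg
        have : ¬(|p.1 - x| < 10) := by rw [← hiv]; exact hEx _ hilt
        simp [pvUpd, this]
    have hbest : pvUpd x (d.get? (c + 1)) (pvUpd x (d.get? c) (pvUpd x (d.get? (c - 1)) (-1))) = -1 := by
      rw [hstep _ _ (Or.inl rfl), hstep _ _ (Or.inl rfl), hstep _ _ (Or.inl rfl)]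
    have hno : ∀ p ∈ abs, ¬(|p.1 - pvGi l ia| < 10) := by
      intro p hp
      obtain ⟨k, hk, hkp⟩ := List.getElem_of_mem (List.mem_map_of_mem hp : p.1 ∈ S)
      have : S.getD k 0 = p.1 := by rw [List.getD_eq_getElem S 0 hk, hkp]
      rw [← hx, ← this]
      exact hEx k hk
    have hadd : pvAddLine ia abs l = abs ++ [(x, [l])] := pvAddLine_no ia l abs hno
    have hfst : (pvAddLine ia abs l).map Prod.fst = S ++ [x] := by simp [hadd, hS]
    constructor
    · simp only [pvStepB, ← hx, ← hc, hbest]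
      norm_num
      simp [hadd]
    · simp only [pvStepB, ← hx, ← hc, hbest]
      norm_num
      rw [hfst]
      refine ⟨?_, ?_, ?_⟩
      · intro k hk
        simp only [List.length_append, List.length_singleton] at hk
        rcases Nat.lt_succ_iff_lt_or_eq.mp hk with hk' | hk'
        · have hgd : (S ++ [x]).getD k 0 = S.getD k 0 := by
            rw [List.getD_eq_getElem _ 0 (by simp; omega), List.getElem_append_left (by omega),
              List.getD_eq_getElem _ 0 hk']
          rw [hgd]
          have hne : PySem.Int.floordiv (S.getD k 0) 10 ≠ c := fun hcc =>
            hEx k hk' (pvCell_close _ _ (hcc.trans hc))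
          rw [PySem.Dict.get?_insert_of_ne _ _ hne]
          exact h1 k hk'
        · subst hk'
          have hgd : (S ++ [x]).getD S.length 0 = x := by
            rw [List.getD_eq_getElem _ 0 (by simp), List.getElem_append_right (by omega)]
            simp
          rw [hgd, hc, PySem.Dict.get?_insert_self]
          simp [List.length_map, hS]
      · intro c' a i hg
        rw [PySem.Dict.get?_insert (d := d)] at hg
        split_ifs at hg with hcc
        · cases hg
          have hlen2 : ((abs.length : Int)).toNat = S.length := by simp [hS]
          refine ⟨by positivity, ?_, ?_, ?_⟩
          · rw [hlen2]; simp
          · rw [hlen2, List.getD_eq_getElem _ 0 (by simp), List.getElem_append_right (by omega)]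
            simp
          · rw [hcc]
        · obtain ⟨hi0, hilt, hiv, hcv⟩ := h2 c' a i hg
          refine ⟨hi0, by simp; omega, ?_, hcv⟩
          rw [List.getD_eq_getElem _ 0 (by simp; omega), List.getElem_append_left hilt,
            ← List.getD_eq_getElem _ 0 hilt, hiv]
      · rw [List.pairwise_append]
        refine ⟨h3, by simp, ?_⟩
        intro a ha b hb
        simp only [List.mem_singleton] at hb
        subst hb
        obtain ⟨k, hk, hkp⟩ := List.getElem_of_mem ha
        have hga : S.getD k 0 = a := by rw [List.getD_eq_getElem S 0 hk, hkp]
        exact not_lt.mp (hga ▸ hEx k hk)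
  · -- some seed matches: best is the least matching index, that bucket is extended
    push Not at hEx
    have hPdec : DecidablePred (fun k => k < S.length ∧ |S.getD k 0 - x| < 10) := by
      intro k; infer_instance
    obtain ⟨k₁, hk₁⟩ := hEx
    have hEx' : ∃ k, k < S.length ∧ |S.getD k 0 - x| < 10 := ⟨k₁, hk₁⟩
    have k₀ := Nat.find hEx'
    set k0 := Nat.find hEx' with hk0def
    obtain ⟨hk0lt, hk0m⟩ := Nat.find_spec hEx'
    have hleast : ∀ j, j < k0 → ¬(j < S.length ∧ |S.getD j 0 - x| < 10) := fun j hj =>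
      Nat.find_min hEx' hj
    -- the cell of seed k0 is one of the three probed cells and holds exactly (seed, k0)
    have hcell := pvCell_range (S.getD k0 0) x hk0m
    have hlook := h1 k0 hk0lt
    set cc0 := PySem.Int.floordiv (S.getD k0 0) 10 with hcc0
    have hcases : cc0 = c - 1 ∨ cc0 = c ∨ cc0 = c + 1 := by rw [← hc] at hcell; omega
    set b1 := pvUpd x (d.get? (c - 1)) (-1) with hb1
    set b2 := pvUpd x (d.get? c) b1 with hb2
    set b3 := pvUpd x (d.get? (c + 1)) b2 with hb3
    have hub : 0 ≤ b3 ∧ b3 ≤ (k0 : Int) := by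
      rcases hcases with h' | h' | h'
      · have s1 : 0 ≤ b1 ∧ b1 ≤ (k0 : Int) := by
          rw [hb1, ← h', hlook]
          exact pvUpd_hit x _ _ _ hk0m (by positivity)
        have s2 := pvUpd_le x (d.get? c) b1 s1.1 (hnn c)
        have s3 := pvUpd_le x (d.get? (c + 1)) b2 (hb2 ▸ s2.1) (hnn (c + 1))
        rw [hb3, hb2] at *
        exact ⟨s3.1, le_trans s3.2 (le_trans s2.2 s1.2)⟩
      · have s1 : 0 ≤ b2 ∧ b2 ≤ (k0 : Int) := by
          rw [hb2, ← h', hlook]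
          exact pvUpd_hit x _ _ _ hk0m (by positivity)
        have s3 := pvUpd_le x (d.get? (c + 1)) b2 s1.1 (hnn (c + 1))
        rw [hb3] at *
        exact ⟨s3.1, le_trans s3.2 s1.2⟩
      · rw [hb3, ← h', hlook]
        exact pvUpd_hit x _ _ _ hk0m (by positivity)
    have hQ3 : b3 = -1 ∨ (0 ≤ b3 ∧ b3.toNat < S.length ∧ |S.getD b3.toNat 0 - x| < 10) := by
      rw [hb3]
      exact hQ _ _ (hb2 ▸ hQ _ _ (hb1 ▸ hQ _ _ (Or.inl rfl)))
    have hb3k0 : b3 = (k0 : Int) := by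
      rcases hQ3 with h' | ⟨h0, hlt, hm⟩
      · omega
      · have : k0 ≤ b3.toNat := by
          by_contra hcon
          exact hleast b3.toNat (by omega) ⟨hlt, hm⟩
        omega
    have hadd : pvAddLine ia abs l = abs.modify k0 (fun p => (p.1, p.2 ++ [l])) := by
      apply pvAddLine_yes ia l abs k0 (by omega) (by rw [← hS, ← hx]; exact hk0m)
      intro j hj
      rw [← hS, ← hx]
      exact fun hmj => hleast j hj ⟨by omega, hmj⟩
    constructor
    · simp only [pvStepB, ← hx, ← hc, ← hb1, ← hb2, ← hb3, hb3k0]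
      norm_num
      rw [hadd]
      exact (pvMapSnd_modify (fun b => b ++ [l]) abs k0).symm
    · simp only [pvStepB, ← hx, ← hc, ← hb1, ← hb2, ← hb3, hb3k0]
      norm_num
      rw [hadd, pvMapFst_modify (fun b => b ++ [l]) abs k0, ← hS]
      exact ⟨h1, h2, h3⟩

-- the whole bucketing fold: B's grid state projects to the ghost fold
theorem pvFold_corr (ia : Nat) : ∀ (lines : List (List Int)) (d : PySem.Dict Int (Int × Int))
    (abs : List (Int × List (List Int))), pvInvB d (abs.map Prod.fst) →
    (lines.foldl (pvStepB ia) (d, abs.map Prod.snd)).2 =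
      (lines.foldl (pvAddLine ia) abs).map Prod.snd := by
  intro lines
  induction lines with
  | nil => intro d abs _; simp
  | cons l ls ih =>
    intro d abs hI
    have h := pvStep_corr ia d abs hI l
    have hpair : pvStepB ia (d, abs.map Prod.snd) l =
        ((pvStepB ia (d, abs.map Prod.snd) l).1, (pvAddLine ia abs l).map Prod.snd) := by
      rw [← h.1]
    rw [List.foldl_cons, List.foldl_cons, hpair]
    exact ih _ _ h.2

-- A's merge loop equals B's run splitting, for any nonempty pending run c :: cs whose
-- accumulated state (c_min, c_max, avg_pos, count) matches the run
theorem pvLoop_eq_runs (i0 ia : Nat) (horiz : Bool) :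
    ∀ (rest : List (List Int)) (c : List Int) (cs : List (List Int)),
    pvLoopA i0 ia horiz rest (min (pvGi c i0) (pvGi c (i0 + 2))) (pvRunMax i0 c cs)
        (((c :: cs).map (fun l => pvGi l ia)).sum) ((c :: cs).length) =
      (pvSplitRuns i0 rest (pvRunMax i0 c cs) (c :: cs)).map (pvEmitRun i0 ia horiz) := by
  intro rest
  induction rest with
  | nil => intro c cs; simp [pvLoopA, pvSplitRuns, pvEmitRun]
  | cons l ls ih =>
    intro c cs
    by_cases h : min (pvGi l i0) (pvGi l (i0 + 2)) ≤ pvRunMax i0 c cs + 60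
    · rw [pvLoopA, pvSplitRuns]
      simp only [if_pos h]
      have hmax : max (pvRunMax i0 c cs) (max (pvGi l i0) (pvGi l (i0 + 2))) =
          pvRunMax i0 c (cs ++ [l]) := by simp [pvRunMax, List.foldl_append]
      have hcons : (c :: cs) ++ [l] = c :: (cs ++ [l]) := by simp
      rw [hmax, hcons]
      have := ih c (cs ++ [l])
      simp only [List.map_append, List.length_append, List.map_cons,
        List.length_cons] at this ⊢
      convert this using 3; (try simp); (try ring)
    · rw [pvLoopA, pvSplitRuns]
      simp only [if_neg h, List.map_cons]
      congr 1
      · simpa [pvRunMax] using ih l []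

-- per-bucket: A's sort-and-merge equals B's sort, run-split and per-run emit
theorem pvProc_eq (i0 ia : Nat) (horiz : Bool) (b : List (List Int)) :
    pvProcA i0 ia horiz b = pvProcB i0 ia horiz b := by
  unfold pvProcA pvProcB
  cases hs : PySem.List.sorted b (fun l => min (pvGi l i0) (pvGi l (i0 + 2))) with
  | nil => rfl
  | cons c rest => simpa [pvRunMax] using pvLoop_eq_runs i0 ia horiz rest c []

-- ===== VERDICT (by name: the statement is the Claim_ definition above) =====
theorem stitch_sequential_lines_spec : Claim_equal_stitch_sequential_lines := by
  intro lines orientation _ _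
  unfold Spec_stitch_sequential_lines stitch_sequential_lines stitch_sequential_lines_alt
  by_cases hl : lines = []
  · simp [hl]
  · simp only [if_neg hl]
    have hfold := pvFold_corr (if orientation = "horizontal" then 1 else 0) lines
      PySem.Dict.empty [] pvInvB_empty
    simp only [List.map_nil] at hfold
    rw [PySem.List.foldl_append_eq_flatMap, hfold, pvBuckets_eq,
      funext (pvProc_eq (if orientation = "horizontal" then 0 else 1)
        (if orientation = "horizontal" then 1 else 0) (decide (orientation = "horizontal"))),
      List.nil_append]
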